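-- pv_equiv track=rewrite | github.com/bennydan7/A2SV | note/mat.py | deleteGreatestValue
-- ===== SOURCE A (Python) =====
-- def deleteGreatestValue(grid):
--
--     answer = 0
--     while grid[0]:
--         max_values = [max(row) for row in grid]
--         answer += max(max_values)
--         for i in range(len(grid)):
--             grid[i].remove(max_values[i])
--     return answer
-- ===== SOURCE B (Python) =====
-- def deleteGreatestValue(grid):
--     # Sort each row descending once, then sum the max of each "column" of
--     # removal rounds.  (Return-value equivalent to A; does not mutate grid.)
--     n = len(grid[0])
--     rows = [sorted(row, reverse=True) for row in grid]
--     answer = 0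
--     for j in range(n):
--         answer += max(row[j] for row in rows)
--     return answer
-- ===== Notes on version B (the rewrite author's own statement) =====
-- stated objective: faster
-- what changed: Replaces A's repeated per-round max-scan-and-remove over every row with a one-time descending sort of each row followed by a single column-by-column pass summing the per-column maxima.
import Mathlib
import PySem

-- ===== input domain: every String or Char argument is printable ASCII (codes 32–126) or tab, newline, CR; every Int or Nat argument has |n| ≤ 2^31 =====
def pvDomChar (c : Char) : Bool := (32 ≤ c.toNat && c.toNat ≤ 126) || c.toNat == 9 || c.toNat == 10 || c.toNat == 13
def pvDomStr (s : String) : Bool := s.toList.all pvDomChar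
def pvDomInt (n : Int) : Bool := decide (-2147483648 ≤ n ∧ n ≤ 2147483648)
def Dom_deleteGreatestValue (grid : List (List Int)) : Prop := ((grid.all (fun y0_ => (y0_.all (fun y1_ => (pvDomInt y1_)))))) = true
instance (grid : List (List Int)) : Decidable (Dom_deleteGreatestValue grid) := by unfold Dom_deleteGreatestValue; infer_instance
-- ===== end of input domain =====

-- B sorts each row descending once, then sums column maxima in one pass, instead of A's
-- per-round max-scan-and-remove; equivalence is about the RETURN value only (A empties the
-- rows of its argument in place, B does not mutate it).

-- ===== PORT A =====
-- while grid[0]: … ; fuel = len(grid[0]) is only a totality guard (each round removes one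
-- element from grid[0]); where Python raises (max([]) ValueError) the port returns junk —
-- those inputs are excluded by Pre_.
def loopA : Nat → List (List Int) → Int → Int
  | 0, _, ans => ans
  | n + 1, grid, ans =>
    if grid.headD [] = [] then ans
    else
      match grid.mapM (fun row => PySem.List.max? row (fun x => x)) with
      | none => ans  -- max([]) raises ValueError; outside Pre_
      | some max_values =>
          loopA n
            (List.zipWith (fun row m => (PySem.List.remove? row m).getD row) grid max_values)
            (ans + (PySem.List.max? max_values (fun x => x)).getD 0)

def deleteGreatestValue (grid : List (List Int)) : Int :=
  loopA (grid.headD []).length grid 0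

-- ===== PORT B =====
def sdRow (row : List Int) : List Int := PySem.List.sorted row (fun x => x) true

-- answer += max(row[j] for row in rows); row[j] out of range raises IndexError; outside Pre_
def colStep (rows : List (List Int)) (answer : Int) (j : Nat) : Int :=
  match rows.mapM (fun row => row[j]?) with
  | none => answer
  | some col => answer + (PySem.List.max? col (fun x => x)).getD 0

def deleteGreatestValue_alt (grid : List (List Int)) : Int :=
  (List.range (grid.headD []).length).foldl (colStep (grid.map sdRow)) 0

-- ===== PRECONDITION & SPEC =====
-- Pre_ excludes exactly the inputs on which Python A raises: the empty grid (grid[0] is an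
-- IndexError) and grids where some row is shorter than row 0 (max([]) ValueError once that
-- row has been emptied).  B raises there too (IndexError).
def Pre_deleteGreatestValue (grid : List (List Int)) : Prop :=
  grid ≠ [] ∧ ∀ row ∈ grid, (grid.headD []).length ≤ row.length
instance (grid : List (List Int)) : Decidable (Pre_deleteGreatestValue grid) := by
  unfold Pre_deleteGreatestValue; infer_instance

def pvWitness_deleteGreatestValue : List (List Int) := [[1, 2, 4], [3, 4, 2]]

def Spec_deleteGreatestValue (grid : List (List Int)) (out : Int) : Prop := out = deleteGreatestValue_alt grid
instance (grid : List (List Int)) (out : Int) : Decidable (Spec_deleteGreatestValue grid out) := by unfold Spec_deleteGreatestValue; infer_instance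

-- ===== CLAIM (what is proved, stated in full; the proofs are below) =====
def Claim_equal_deleteGreatestValue : Prop := ∀ (grid : List (List Int)), Dom_deleteGreatestValue grid → Pre_deleteGreatestValue grid → Spec_deleteGreatestValue grid (deleteGreatestValue grid)

-- ===== LEMMAS AND PROOFS =====

-- head of the descending sort is the value max() returns, and removing it leaves the tail
theorem sdRow_eq_cons {row : List Int} {m : Int}
    (hm : PySem.List.max? row (fun x => x) = some m) :
    sdRow row = m :: sdRow (row.erase m) := by
  have hmem : m ∈ row := PySem.List.max?_mem hm
  have hrow : row ≠ [] := by intro h; subst h; simp at hmem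
  obtain ⟨h, t, hht⟩ : ∃ h t, PySem.List.sorted row (fun x => x) true = h :: t := by
    cases hsd : PySem.List.sorted row (fun x => x) true with
    | nil => exact absurd ((PySem.List.sorted_eq_nil_iff row (fun x => x) true).mp hsd) hrow
    | cons h t => exact ⟨h, t, rfl⟩
  have hhin : h ∈ row := by
    refine (PySem.List.mem_sorted row (fun x => x) true h).mp ?_
    rw [hht]; exact List.mem_cons_self
  have hhm : h = m := by
    have h1 : h ≤ m := PySem.List.max?_isMax hm h hhin
    have h2 : m ≤ h := PySem.List.key_head_sorted_rev_ge row (fun x => x) hht m hmem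
    omega
  subst hhm
  -- t and sdRow (row.erase h) are permutations, both pairwise (· ≥ ·) over Int
  have hperm : (sdRow (row.erase h)).Perm t := by
    have p1 : (h :: t).Perm row := by
      rw [← hht]; exact PySem.List.sorted_perm row (fun x => x) true
    have p2 : row.Perm (h :: row.erase h) := List.perm_cons_erase hhin
    exact ((PySem.List.sorted_perm (row.erase h) (fun x => x) true).trans
      (p1.trans p2).cons_inv.symm)
  have pw1 : List.Pairwise (fun a b : Int => b ≤ a) (sdRow (row.erase h)) :=
    PySem.List.sorted_pairwise_rev (row.erase h) (fun x => x)
  have pw2 : List.Pairwise (fun a b : Int => b ≤ a) t := by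
    have pw0 := PySem.List.sorted_pairwise_rev row (fun x => x)
    rw [hht] at pw0
    exact pw0.of_cons
  have key : sdRow (row.erase h) = t :=
    List.eq_of_perm_of_sorted (le := fun a b : Int => b ≤ a)
      (fun a b _ _ h1 h2 => le_antisymm h2 h1) pw1 pw2 hperm
  show PySem.List.sorted row (fun x => x) true = h :: sdRow (row.erase h)
  rw [hht, key]

-- one round of A, seen through the sorted rows
theorem round_facts :
    ∀ (grid : List (List Int)) (mv : List Int),
      grid.mapM (fun row => PySem.List.max? row (fun x => x)) = some mv →
      ((grid.map sdRow).mapM (fun r => r[0]?) = some mv)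
      ∧ ((List.zipWith (fun row m => (PySem.List.remove? row m).getD row) grid mv).map sdRow
          = (grid.map sdRow).map List.tail)
      ∧ ((List.zipWith (fun row m => (PySem.List.remove? row m).getD row) grid mv).map List.length
          = grid.map (fun r => r.length - 1)) := by
  intro grid
  induction grid with
  | nil => intro mv hmv; simp_all
  | cons g0 gs ih =>
    intro mv hmv
    simp only [List.mapM_cons, Option.bind_eq_bind, Option.bind_eq_some_iff,
      Option.pure_def, Option.some.injEq] at hmv
    obtain ⟨m0, hm0, mvs, hmvs, hmv⟩ := hmv
    subst hmv
    obtain ⟨ha, hb, hc⟩ := ih mvs hmvs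
    have hm0mem : m0 ∈ g0 := PySem.List.max?_mem hm0
    have hrem : (PySem.List.remove? g0 m0).getD g0 = g0.erase m0 := by
      rw [PySem.List.remove?_eq_some_erase g0 m0 hm0mem]; rfl
    refine ⟨?_, ?_, ?_⟩
    · simp only [List.map_cons, List.mapM_cons, sdRow_eq_cons hm0, ha]
      rfl
    · simp only [List.zipWith_cons_cons, List.map_cons, hb, hrem, sdRow_eq_cons hm0,
        List.tail_cons]
    · simp only [List.zipWith_cons_cons, List.map_cons, hc, hrem,
        List.length_erase_of_mem hm0mem]

-- all rows nonempty ⇒ the list of per-row maxima exists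
theorem mapM_max_exists :
    ∀ (grid : List (List Int)), (∀ row ∈ grid, row ≠ []) →
      ∃ mv, grid.mapM (fun row => PySem.List.max? row (fun x => x)) = some mv := by
  intro grid
  induction grid with
  | nil => intro _; exact ⟨[], rfl⟩
  | cons g0 gs ih =>
    intro h
    obtain ⟨mvs, hmvs⟩ := ih (fun r hr => h r (List.mem_cons_of_mem _ hr))
    cases hm0 : PySem.List.max? g0 (fun x => x) with
    | none =>
      exact absurd ((PySem.List.max?_eq_none_iff g0 (fun x => x)).mp hm0)
        (h g0 List.mem_cons_self)
    | some m0 =>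
      refine ⟨m0 :: mvs, ?_⟩
      simp [List.mapM_cons, hm0, hmvs]

-- shifting the column index past the heads
theorem mapM_getElem_succ (j : Nat) :
    ∀ (rows : List (List Int)), (∀ r ∈ rows, r ≠ []) →
      rows.mapM (fun r => r[j + 1]?) = (rows.map List.tail).mapM (fun r => r[j]?) := by
  intro rows
  induction rows with
  | nil => intro _; rfl
  | cons r rs ih =>
    intro h
    cases hr : r with
    | nil => exact absurd hr (h r List.mem_cons_self)
    | cons x t =>
      simp only [List.map_cons, List.mapM_cons, List.tail_cons, List.getElem?_cons_succ,
        ih (fun r hr => h r (List.mem_cons_of_mem _ hr))]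

-- peel the first column off B's fold
theorem foldl_colStep_succ (rows : List (List Int)) (n : Nat) (init : Int)
    (hne : ∀ r ∈ rows, r ≠ []) :
    (List.range (n + 1)).foldl (colStep rows) init
      = (List.range n).foldl (colStep (rows.map List.tail)) (colStep rows init 0) := by
  rw [List.range_succ_eq_map, List.foldl_cons, List.foldl_map]
  congr 1
  funext a j
  show colStep rows a (j + 1) = colStep (rows.map List.tail) a j
  unfold colStep
  rw [mapM_getElem_succ j rows hne]

-- main invariant: A's loop equals B's column fold
theorem loopA_eq_fold :
    ∀ (n : Nat) (grid : List (List Int)) (ans : Int), grid ≠ [] →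
      (grid.headD []).length = n → (∀ row ∈ grid, n ≤ row.length) →
      loopA n grid ans = (List.range n).foldl (colStep (grid.map sdRow)) ans := by
  intro n
  induction n with
  | zero => intro grid ans _ _ _; simp [loopA]
  | succ n ih =>
    intro grid ans hgrid hhead hlen
    have hne : ∀ row ∈ grid, row ≠ [] := by
      intro row hr h
      have := hlen row hr
      subst h; simp at this
    obtain ⟨mv, hmv⟩ := mapM_max_exists grid hne
    have hheadne : grid.headD [] ≠ [] := by
      intro h; rw [h] at hhead; simp at hhead
    obtain ⟨ha, hb, hc⟩ := round_facts grid mv hmv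
    set grid' := List.zipWith (fun row m => (PySem.List.remove? row m).getD row) grid mv
      with hgrid'
    -- lengths of the new rows
    have hlen' : ∀ row ∈ grid', n ≤ row.length := by
      intro row hr
      have : row.length ∈ grid'.map List.length := List.mem_map_of_mem hr
      rw [hc] at this
      obtain ⟨r0, hr0, hlr⟩ := List.mem_map.mp this
      have := hlen r0 hr0
      omega
    -- grid' is nonempty and its head has length n
    obtain ⟨g0, gs, hcons⟩ : ∃ g0 gs, grid = g0 :: gs := by
      cases grid with
      | nil => exact absurd rfl hgrid
      | cons a b => exact ⟨a, b, rfl⟩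
    obtain ⟨m0, mvs, hmcons⟩ : ∃ m0 mvs, mv = m0 :: mvs := by
      cases mv with
      | nil =>
        rw [hcons] at hmv
        simp only [List.mapM_cons, Option.bind_eq_bind, Option.bind_eq_some_iff,
          Option.pure_def, Option.some.injEq] at hmv
        obtain ⟨_, _, _, _, h⟩ := hmv
        exact absurd h (List.cons_ne_nil _ _)
      | cons a b => exact ⟨a, b, rfl⟩
    have hgrid'cons : grid' = ((PySem.List.remove? g0 m0).getD g0) ::
        List.zipWith (fun row m => (PySem.List.remove? row m).getD row) gs mvs := by
      rw [hgrid', hcons, hmcons]; rfl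
    have hgrid'ne : grid' ≠ [] := by rw [hgrid'cons]; simp
    have hhead' : (grid'.headD []).length = n := by
      have : grid'.map List.length = grid.map (fun r => r.length - 1) := hc
      rw [hgrid'cons, hcons] at this
      simp only [List.map_cons, List.cons.injEq] at this
      rw [hgrid'cons]
      simp only [List.headD_cons]
      rw [this.1]
      rw [hcons] at hhead
      simp only [List.headD_cons] at hhead
      omega
    -- unfold one round of A
    have hstep : loopA (n + 1) grid ans
        = loopA n grid' (ans + (PySem.List.max? mv (fun x => x)).getD 0) := by
      rw [loopA]
      rw [if_neg hheadne, hmv]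
    rw [hstep, ih grid' _ hgrid'ne hhead' hlen']
    -- unfold one column of B
    have hrowsne : ∀ r ∈ grid.map sdRow, r ≠ [] := by
      intro r hr
      obtain ⟨r0, hr0, hrr⟩ := List.mem_map.mp hr
      subst hrr
      intro h
      exact hne r0 hr0 ((PySem.List.sorted_eq_nil_iff r0 (fun x => x) true).mp h)
    rw [foldl_colStep_succ (grid.map sdRow) n ans hrowsne, hb]
    congr 1
    unfold colStep
    rw [ha]

-- ===== VERDICT (by name: the statement is the Claim_ definition above) =====
theorem deleteGreatestValue_spec : Claim_equal_deleteGreatestValue := by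
  intro grid _ hpre
  obtain ⟨hgrid, hlen⟩ := hpre
  unfold Spec_deleteGreatestValue deleteGreatestValue deleteGreatestValue_alt
  exact loopA_eq_fold (grid.headD []).length grid 0 hgrid rfl hlen
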